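-- pv_equiv track=rewrite | github.com/lsm424/hutb_hpc | common/ecript.py | parse_to_words
-- ===== SOURCE A (Python) =====
-- def parse_to_words(key_str):
--     """
--     完全模拟JavaScript的parse函数，生成words数组
--     """
--     utf8_bytes = key_str.encode('utf-8')
--     length = len(utf8_bytes)
--     words = []
--
--     for i in range(0, length, 4):
--         word = 0
--         for j in range(4):
--             if i + j < length:
--                 word |= (utf8_bytes[i + j] & 0xFF) << (24 - j * 8)
--             else:
--                 word |= 0 << (24 - j * 8)
--         words.append(word)
--
--     # 确保有4个words（16字节）
--     while len(words) < 4: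
--         words.append(0)
--
--     return words, length
-- ===== SOURCE B (Python) =====
-- def parse_to_words(key_str):
--     data = key_str.encode('utf-8')
--     length = len(data)
--     padded_len = max((length + 3) // 4 * 4, 16)
--     padded = data.ljust(padded_len, b'\x00')
--     words = [int.from_bytes(padded[i:i + 4], 'big') for i in range(0, padded_len, 4)]
--     return words, length
-- ===== Notes on version B (the rewrite author's own statement) =====
-- stated objective: faster
-- what changed: B pads the UTF-8 bytes up front to max(ceil4(len),16) zero bytes and converts uniform 4-byte chunks with int.from_bytes in a comprehension, replacing A's per-byte conditional shift-OR inner loop and the trailing while-append padding loop.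
import Mathlib
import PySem

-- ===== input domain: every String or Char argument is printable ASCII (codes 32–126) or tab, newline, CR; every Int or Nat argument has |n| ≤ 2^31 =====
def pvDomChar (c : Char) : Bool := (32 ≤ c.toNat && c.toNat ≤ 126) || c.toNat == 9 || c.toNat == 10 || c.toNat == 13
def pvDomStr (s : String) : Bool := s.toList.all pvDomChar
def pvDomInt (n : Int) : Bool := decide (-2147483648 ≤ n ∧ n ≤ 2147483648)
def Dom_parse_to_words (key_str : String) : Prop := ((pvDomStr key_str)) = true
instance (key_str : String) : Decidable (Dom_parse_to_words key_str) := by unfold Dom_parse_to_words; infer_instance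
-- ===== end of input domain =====

-- B pads the byte string up front to max(ceil4(len),16) zero bytes and converts uniform
-- 4-byte chunks with int.from_bytes, replacing A's per-byte conditional shift-OR loop and
-- the trailing while-append padding loop (measured faster by a constant factor; no mutation).

-- ===== PORT A =====
-- key_str.encode('utf-8'): on Dom (ASCII + tab/newline/CR) each byte is the char code; exact there.
def pvBytesA (s : String) : List Nat := s.toList.map Char.toNat

-- inner loop: for j in range(4): word |= (utf8_bytes[i+j] & 0xFF) << (24 - j*8) (else |= 0 << …)
def pvAWord (bytes : List Nat) (length i : Nat) : Nat :=
  (List.range 4).foldl (fun w j =>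
    if i + j < length then w ||| ((bytes.getD (i + j) 0 &&& 0xFF) <<< (24 - j * 8))
    else w ||| (0 <<< (24 - j * 8))) 0

-- outer loop: for i in range(0, length, 4): words.append(word)
def pvALoop (bytes : List Nat) (length i : Nat) (words : List Int) : List Int :=
  if h : i < length then
    pvALoop bytes length (i + 4) (words ++ [(pvAWord bytes length i : Int)])
  else words
termination_by length - i
decreasing_by omega

-- while len(words) < 4: words.append(0)
def pvAPad (words : List Int) : List Int :=
  if h : words.length < 4 then pvAPad (words ++ [0]) else words
termination_by 4 - words.length
decreasing_by simp only [List.length_append, List.length_cons, List.length_nil]; omega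

def parse_to_words (key_str : String) : List Int × Int :=
  let utf8_bytes := pvBytesA key_str
  let length := utf8_bytes.length
  let words := pvALoop utf8_bytes length 0 []
  (pvAPad words, (length : Int))

-- ===== PORT B =====
-- int.from_bytes(chunk, 'big'): big-endian fold, exact by definition.
def pvFromBytes (chunk : List Nat) : Nat := chunk.foldl (fun a b => a * 256 + b) 0

def parse_to_words_alt (key_str : String) : List Int × Int :=
  let data := key_str.toList.map Char.toNat
  let length := data.length
  let padded_len := max ((length + 3) / 4 * 4) 16
  -- data.ljust(padded_len, b'\x00')
  let padded := data ++ List.replicate (padded_len - length) 0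
  -- [int.from_bytes(padded[i:i+4], 'big') for i in range(0, padded_len, 4)]
  let words := (PySem.List.pyRange 0 (padded_len : Int) 4).map
    (fun i => ((pvFromBytes (PySem.List.slice padded (some i) (some (i + 4))) : Nat) : Int))
  (words, (length : Int))

-- ===== PRECONDITION & SPEC =====
def Spec_parse_to_words (key_str : String) (out : List Int × Int) : Prop := out = parse_to_words_alt key_str
instance (key_str : String) (out : List Int × Int) : Decidable (Spec_parse_to_words key_str out) := by unfold Spec_parse_to_words; infer_instance

-- ===== CLAIM (what is proved, stated in full; the proofs are below) =====
def Claim_equal_parse_to_words : Prop := ∀ (key_str : String), Dom_parse_to_words key_str → Spec_parse_to_words key_str (parse_to_words key_str)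

-- ===== LEMMAS AND PROOFS =====

-- proof-side helper: B's word list viewed as structural 4-byte chunking
def pvBChunks (data : List Nat) : List Int :=
  if h : data = [] then []
  else ((pvFromBytes (data.take 4) : Nat) : Int) :: pvBChunks (data.drop 4)
termination_by data.length
decreasing_by
  have : 0 < data.length := List.length_pos_of_ne_nil h
  simp only [List.length_drop]; omega

-- B's comprehension over range(0, padded_len, 4) = the structural chunking
theorem pvBChunks_eq_map (k : Nat) (l : List Nat) (hk : l.length = 4 * k) :
    (List.range k).map (fun j => ((pvFromBytes ((l.drop (4 * j)).take 4) : Nat) : Int))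
      = pvBChunks l := by
  induction k generalizing l with
  | zero =>
    have hnil : l = [] := List.eq_nil_of_length_eq_zero (by omega)
    subst hnil; rw [pvBChunks]; simp
  | succ k ih =>
    have hne : l ≠ [] := by
      intro h; rw [h] at hk; simp at hk
    rw [pvBChunks, dif_neg hne, List.range_succ_eq_map, List.map_cons, List.map_map]
    congr 1
    rw [← ih (l.drop 4) (by simp only [List.length_drop]; omega)]
    apply List.map_congr_left
    intro j _
    simp only [Function.comp]
    rw [show 4 * (j + 1) = 4 + 4 * j from by omega, ← List.drop_drop]

theorem pvBwords_eq (l : List Nat) (k : Nat) (hk : l.length = 4 * k) :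
    (PySem.List.pyRange 0 ((l.length : Nat) : Int) 4).map
        (fun i => ((pvFromBytes (PySem.List.slice l (some i) (some (i + 4))) : Nat) : Int))
      = pvBChunks l := by
  rw [PySem.List.pyRange_of_pos _ _ (by norm_num : (0:Int) < 4)]
  by_cases hk0 : k = 0
  · subst hk0
    have hnil : l = [] := List.eq_nil_of_length_eq_zero (by omega)
    subst hnil
    rw [pvBChunks]
    simp
  · have hpos : (0 : Int) < (l.length : Int) := by
      have : 0 < l.length := by omega
      exact_mod_cast this
    rw [if_pos hpos]
    have hcnt : (((l.length : Int) - 0 + 4 - 1) / 4).toNat = k := by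
      have : (l.length : Int) = 4 * (k : Int) := by exact_mod_cast hk
      rw [this]; omega
    rw [hcnt, List.map_map, ← pvBChunks_eq_map k l hk]
    apply List.map_congr_left
    intro j _
    simp only [Function.comp]
    rw [show (0 : Int) + 4 * (j : Int) = ((4 * j : Nat) : Int) from by push_cast; ring,
      show ((4 * j : Nat) : Int) + 4 = ((4 * j : Nat) : Int) + ((4 : Nat) : Int) from by norm_num,
      PySem.List.slice_natCast_add]


-- the accumulator of A's outer loop is a prefix
theorem pvALoop_append (b : List Nat) (n i : Nat) (ws : List Int) :
    pvALoop b n i ws = ws ++ pvALoop b n i [] := by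
  by_cases h : i < n
  · conv_lhs => rw [pvALoop, dif_pos h]
    conv_rhs => rw [pvALoop, dif_pos h]
    rw [pvALoop_append b n (i + 4) (ws ++ _), pvALoop_append b n (i + 4) ([] ++ _)]
    simp
  · conv_lhs => rw [pvALoop, dif_neg h]
    conv_rhs => rw [pvALoop, dif_neg h]
    simp
termination_by n - i
decreasing_by all_goals omega

-- shifting the outer loop by one chunk = dropping 4 bytes
theorem pvAWord_shift (l : List Nat) (i : Nat) (h4 : 4 ≤ l.length) :
    pvAWord l l.length (i + 4) = pvAWord (l.drop 4) (l.drop 4).length i := by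
  have g : ∀ j : Nat, (i + 4 + j < l.length) ↔ (i + j < (l.drop 4).length) := by
    intro j; simp only [List.length_drop]; omega
  have gd : ∀ j : Nat, (l.drop 4).getD (i + j) 0 = l.getD (i + 4 + j) 0 := by
    intro j
    simp only [List.getD_eq_getElem?_getD, List.getElem?_drop,
      show 4 + (i + j) = i + 4 + j from by omega]
  simp only [pvAWord, List.range_succ, List.foldl_append, List.foldl_cons, List.foldl_nil,
    List.range_zero, g, gd]

theorem pvALoop_shift (l : List Nat) (i : Nat) (ws : List Int) :
    pvALoop l l.length (i + 4) ws = pvALoop (l.drop 4) (l.drop 4).length i ws := by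
  by_cases h : i + 4 < l.length
  · have h' : i < (l.drop 4).length := by simp only [List.length_drop]; omega
    conv_lhs => rw [pvALoop, dif_pos h]
    conv_rhs => rw [pvALoop, dif_pos h']
    rw [pvAWord_shift l i (by omega), pvALoop_shift l (i + 4)]
  · have h' : ¬ i < (l.drop 4).length := by simp only [List.length_drop]; omega
    conv_lhs => rw [pvALoop, dif_neg h]
    conv_rhs => rw [pvALoop, dif_neg h']
termination_by l.length - i
decreasing_by omega

-- length of A's word list
theorem pvALoop_length (l : List Nat) (n i : Nat) :
    (pvALoop l n i []).length = (n - i + 3) / 4 := by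
  by_cases h : i < n
  · conv_lhs => rw [pvALoop, dif_pos h]
    rw [pvALoop_append]
    simp only [List.length_append, List.length_cons, List.length_nil,
      pvALoop_length l n (i + 4)]
    omega
  · conv_lhs => rw [pvALoop, dif_neg h]
    simp only [List.length_nil]; omega
termination_by n - i
decreasing_by omega

-- the trailing while-loop appends zeros up to length 4
theorem pvAPad_eq (ws : List Int) : pvAPad ws = ws ++ List.replicate (4 - ws.length) 0 := by
  by_cases h : ws.length < 4
  · rw [pvAPad, dif_pos h, pvAPad_eq (ws ++ [0])]
    simp only [List.length_append, List.length_cons, List.length_nil, List.append_assoc]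
    congr 1
    rw [show (4 - ws.length) = (4 - (ws.length + 1)) + 1 from by omega]
    simp [List.replicate_succ]
  · rw [pvAPad, dif_neg h]
    rw [show (4 - ws.length) = 0 from by omega]
    simp
termination_by 4 - ws.length
decreasing_by simp only [List.length_append, List.length_cons, List.length_nil]; omega

-- B on an all-zero tail
theorem pvBChunks_zeros (k : Nat) : pvBChunks (List.replicate (4 * k) 0) = List.replicate k 0 := by
  induction k with
  | zero => rw [pvBChunks]; simp
  | succ k ih =>
    rw [pvBChunks, dif_neg (by simp [show 4 * (k + 1) = 4 * k + 4 from by omega])]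
    rw [List.take_replicate, List.drop_replicate]
    rw [show min 4 (4 * (k + 1)) = 4 from by omega, show 4 * (k + 1) - 4 = 4 * k from by omega]
    rw [ih]
    simp [pvFromBytes, List.replicate_succ]

theorem pvMasked (a : Nat) (ha : a < 256) : a &&& 0xFF = a := by
  have h := Nat.and_two_pow_sub_one_eq_mod a 8
  norm_num at h
  rw [h, Nat.mod_eq_of_lt (by omega)]

-- A's first word = big-endian value of the first padded chunk
theorem pvHead_eq (l : List Nat) (hby : ∀ x ∈ l, x < 256) (m : Nat) (hm : 4 ≤ m)
    (hlm : l.length ≤ m) (hne : l ≠ []) :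
    (pvAWord l l.length 0 : Int) =
      ((pvFromBytes ((l ++ List.replicate (m - l.length) 0).take 4) : Nat) : Int) := by
  congr 1
  rw [List.take_append, List.take_replicate]
  match l, hne with
  | [a], _ =>
    have ha := hby a (by simp)
    rw [show min (4 - [a].length) (m - [a].length) = 3 from by
      simp only [List.length_cons, List.length_nil]; omega]
    norm_num [pvAWord, List.range_succ, pvFromBytes]
    rw [pvMasked a ha, Nat.shiftLeft_eq]
    simp [List.replicate_succ]
    ring
  | [a, b], _ =>
    have ha := hby a (by simp); have hb := hby b (by simp)
    rw [show min (4 - [a, b].length) (m - [a, b].length) = 2 from by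
      simp only [List.length_cons, List.length_nil]; omega]
    norm_num [pvAWord, List.range_succ, pvFromBytes]
    rw [pvMasked a ha, pvMasked b hb]
    rw [← Nat.shiftLeft_add_eq_or_of_lt (show b <<< 16 < 2 ^ 24 from by
      simp only [Nat.shiftLeft_eq]; norm_num; omega)]
    simp [Nat.shiftLeft_eq, List.replicate_succ]
    ring
  | [a, b, c], _ =>
    have ha := hby a (by simp); have hb := hby b (by simp); have hc := hby c (by simp)
    rw [show min (4 - [a, b, c].length) (m - [a, b, c].length) = 1 from by
      simp only [List.length_cons, List.length_nil]; omega]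
    norm_num [pvAWord, List.range_succ, pvFromBytes]
    rw [pvMasked a ha, pvMasked b hb, pvMasked c hc]
    rw [← Nat.shiftLeft_add_eq_or_of_lt (show b <<< 16 < 2 ^ 24 from by
      simp only [Nat.shiftLeft_eq]; norm_num; omega)]
    rw [show a <<< 24 + b <<< 16 = (a * 256 + b) <<< 16 from by
      simp only [Nat.shiftLeft_eq]; ring]
    rw [← Nat.shiftLeft_add_eq_or_of_lt (show c <<< 8 < 2 ^ 16 from by
      simp only [Nat.shiftLeft_eq]; norm_num; omega)]
    simp [Nat.shiftLeft_eq]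
    ring
  | a :: b :: c :: d :: t, _ =>
    have ha := hby a (by simp); have hb := hby b (by simp)
    have hc := hby c (by simp); have hd := hby d (by simp)
    rw [show min (4 - (a :: b :: c :: d :: t).length) (m - (a :: b :: c :: d :: t).length) = 0 from by
      simp only [List.length_cons]; omega]
    norm_num [pvAWord, List.range_succ, pvFromBytes]
    rw [pvMasked a ha, pvMasked b hb, pvMasked c hc, pvMasked d hd]
    rw [← Nat.shiftLeft_add_eq_or_of_lt (show b <<< 16 < 2 ^ 24 from by
      simp only [Nat.shiftLeft_eq]; norm_num; omega)]
    rw [show a <<< 24 + b <<< 16 = (a * 256 + b) <<< 16 from by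
      simp only [Nat.shiftLeft_eq]; ring]
    rw [← Nat.shiftLeft_add_eq_or_of_lt (show c <<< 8 < 2 ^ 16 from by
      simp only [Nat.shiftLeft_eq]; norm_num; omega)]
    rw [show (a * 256 + b) <<< 16 + c <<< 8 = ((a * 256 + b) * 256 + c) <<< 8 from by
      simp only [Nat.shiftLeft_eq]; ring]
    rw [← Nat.shiftLeft_add_eq_or_of_lt (show d < 2 ^ 8 from by omega)]
    simp [Nat.shiftLeft_eq]

-- main correspondence: B on the padded bytes = A's words plus the extra zero words
theorem pvMain (l : List Nat) (hby : ∀ x ∈ l, x < 256) (m : Nat) (hdvd : 4 ∣ m)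
    (hlm : l.length ≤ m) :
    pvBChunks (l ++ List.replicate (m - l.length) 0) =
      pvALoop l l.length 0 [] ++ List.replicate (m / 4 - (l.length + 3) / 4) 0 := by
  by_cases hne : l = []
  · subst hne
    rw [show ([] : List Nat) ++ List.replicate (m - List.length []) 0
        = List.replicate (4 * (m / 4)) 0 from by
      obtain ⟨k, rfl⟩ := hdvd; simp]
    rw [pvBChunks_zeros, pvALoop, dif_neg (by simp)]
    simp
  · have hl1 : 1 ≤ l.length := List.length_pos_of_ne_nil hne
    obtain ⟨k, rfl⟩ := hdvd
    have hm4 : 4 ≤ 4 * k := by omega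
    rw [pvBChunks, dif_neg (by simp [hne])]
    have hdrop : (l ++ List.replicate (4 * k - l.length) 0).drop 4
        = l.drop 4 ++ List.replicate ((4 * (k - 1)) - (l.drop 4).length) 0 := by
      rw [List.drop_append, List.drop_replicate]
      congr 2
      simp only [List.length_drop]
      omega
    rw [hdrop, pvMain (l.drop 4) (fun x hx => hby x (List.mem_of_mem_drop hx)) (4 * (k - 1))
      ⟨k - 1, rfl⟩
      (by simp only [List.length_drop]; omega)]
    conv_rhs => rw [pvALoop, dif_pos (by omega)]
    rw [pvALoop_append, pvALoop_shift]
    rw [← pvHead_eq l hby (4 * k) hm4 hlm hne]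
    have hcc : 4 * (k - 1) / 4 - ((l.drop 4).length + 3) / 4 = 4 * k / 4 - (l.length + 3) / 4 := by
      simp only [List.length_drop]; omega
    rw [hcc, pvALoop_append (l.drop 4) ((l.drop 4).length) 0 ([] ++ [((pvAWord l l.length 0 : Nat) : Int)])]
    simp
termination_by l.length
decreasing_by
  simp only [List.length_drop]; omega

-- Dom gives byte values < 256
theorem pvBytesLt256 (s : String) (h : Dom_parse_to_words s) :
    ∀ x ∈ s.toList.map Char.toNat, x < 256 := by
  intro x hx
  rcases List.mem_map.mp hx with ⟨c, hc, rfl⟩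
  have := List.all_eq_true.mp h c hc
  simp only [pvDomChar, Bool.or_eq_true, Bool.and_eq_true, decide_eq_true_eq,
    beq_iff_eq] at this
  omega

-- ===== VERDICT (by name: the statement is the Claim_ definition above) =====
theorem parse_to_words_spec : Claim_equal_parse_to_words := by
  intro s hDom
  unfold Spec_parse_to_words parse_to_words parse_to_words_alt
  simp only [pvBytesA]
  set l := s.toList.map Char.toNat with hl
  set n := l.length with hn
  set P := max ((n + 3) / 4 * 4) 16 with hP
  have hdvd : 4 ∣ P := by
    have h1 : (4 : Nat) ∣ (n + 3) / 4 * 4 := ⟨(n + 3) / 4, by ring⟩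
    have h2 : (4 : Nat) ∣ 16 := by norm_num
    rw [hP, Nat.max_def]; split_ifs <;> assumption
  have hle : n ≤ P := by
    have h1 : n ≤ (n + 3) / 4 * 4 := by omega
    exact le_trans h1 (le_max_left _ _)
  have hplen : (l ++ List.replicate (P - n) 0).length = 4 * (P / 4) := by
    simp only [List.length_append, List.length_replicate]
    obtain ⟨k, hkk⟩ := hdvd
    omega
  rw [show ((P : Nat) : Int) = (((l ++ List.replicate (P - n) 0).length : Nat) : Int) from by
    rw [hplen]; obtain ⟨k, hkk⟩ := hdvd; push_cast; omega]
  rw [pvBwords_eq (l ++ List.replicate (P - n) 0) (P / 4) hplen]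
  rw [pvMain l (pvBytesLt256 s hDom) P hdvd hle]
  rw [pvAPad_eq, pvALoop_length]
  congr 2
  rcases le_total ((n + 3) / 4) 4 with h | h
  · have h16 : P = 16 := by rw [hP]; exact max_eq_right (by omega)
    rw [h16]; congr 1
  · have hPx : P = (n + 3) / 4 * 4 := by rw [hP]; exact max_eq_left (by omega)
    rw [hPx, Nat.mul_div_cancel _ (by norm_num)]
    congr 1; omega
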